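-- pv_equiv track=rewrite | github.com/iAvicenna/adventofcode2021 | day21/problem2.py | generate_ends
-- ===== SOURCE A (Python) =====
-- import itertools as it
--
-- circular = [10, 1,2,3,4,5,6,7,8,9]
--
-- def generate_ends(start):
--
--     '''
--     Given a starting number this generated all the possible end
--     end points by rolling three dices with faces 1,2,3 and counts the number
--     of combinations of dice rools that ends there. Note that numbers are circular
--     i.e 10 = 0, 11=1 etc...
--     '''
--
--     end_points = []
--
--     for a,b,c in it.product(range(1,4),range(1,4), range(1,4)):
--
--         end = circular[(start + a + b + c)%10]
--
--         end_points.append(end)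
--
--     end_set = sorted(list(set(end_points)))
--
--     end_dict = {x:end_points.count(x) for x in end_set}
--
--     return end_dict
-- ===== SOURCE B (Python) =====
-- circular = [10, 1,2,3,4,5,6,7,8,9]
--
-- def generate_ends(start):
--     # Fixed 3d3 sum multiplicity table instead of enumerating 27 triples.
--     mult = {3: 1, 4: 3, 5: 6, 6: 7, 7: 6, 8: 3, 9: 1}
--     counts = {}
--     for s, m in mult.items():
--         counts[circular[(start + s) % 10]] = m
--     return {x: counts[x] for x in sorted(counts)}
-- ===== Notes on version B (the rewrite author's own statement) =====
-- stated objective: simpler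
-- what changed: Replaces the enumeration of all dice triples plus a per-key list.count pass with the fixed sum-multiplicity table of three dice, assigning each distinct end position its multiplicity directly.
import Mathlib
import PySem

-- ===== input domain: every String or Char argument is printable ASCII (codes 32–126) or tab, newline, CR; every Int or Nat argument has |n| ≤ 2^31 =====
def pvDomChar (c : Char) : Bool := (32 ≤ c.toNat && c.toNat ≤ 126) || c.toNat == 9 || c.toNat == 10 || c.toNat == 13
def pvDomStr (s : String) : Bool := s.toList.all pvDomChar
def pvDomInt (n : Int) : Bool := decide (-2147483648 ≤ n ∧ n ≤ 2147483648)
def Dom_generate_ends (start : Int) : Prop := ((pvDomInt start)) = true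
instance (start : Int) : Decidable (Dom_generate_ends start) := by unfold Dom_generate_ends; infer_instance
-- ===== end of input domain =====

-- B replaces A's 27-triple enumeration + per-key count with the fixed 3d3 multiplicity table (simpler).

-- ===== PORT A =====
def pvCircular : List Int := [10, 1, 2, 3, 4, 5, 6, 7, 8, 9]

def generate_ends (start : Int) : List (Int × Int) :=
  -- it.product(range(1,4),range(1,4),range(1,4)) appended into end_points
  let end_points : List Int :=
    (PySem.List.pyRange 1 4 1).foldl (fun acc1 a =>
      (PySem.List.pyRange 1 4 1).foldl (fun acc2 b =>
        (PySem.List.pyRange 1 4 1).foldl (fun acc3 c =>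
          acc3 ++ [(PySem.List.pyGet? pvCircular (PySem.Int.mod (start + a + b + c) 10)).getD 0]) acc2) acc1) []
  let end_set : List Int := PySem.List.sorted (PySem.Set.ofList end_points) (fun x => x) false
  (end_set.foldl (fun d x => PySem.Dict.insert d x ((PySem.List.count end_points x : Nat) : Int)) (PySem.Dict.mk [] : PySem.Dict Int Int)).items

-- ===== PORT B =====
def pvMult : List (Int × Int) := [(3,1),(4,3),(5,6),(6,7),(7,6),(8,3),(9,1)]

def generate_ends_alt (start : Int) : List (Int × Int) :=
  let counts : PySem.Dict Int Int :=
    pvMult.foldl (fun d sm =>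
      PySem.Dict.insert d ((PySem.List.pyGet? pvCircular (PySem.Int.mod (start + sm.1) 10)).getD 0) sm.2) (PySem.Dict.mk [])
  let keys := PySem.List.sorted (PySem.Dict.keys counts) (fun x => x) false
  (keys.foldl (fun d x => PySem.Dict.insert d x (PySem.Dict.getD counts x 0)) (PySem.Dict.mk [] : PySem.Dict Int Int)).items

-- ===== PRECONDITION & SPEC =====
def Spec_generate_ends (start : Int) (out : List (Int × Int)) : Prop := out = generate_ends_alt start
instance (start : Int) (out : List (Int × Int)) : Decidable (Spec_generate_ends start out) := by unfold Spec_generate_ends; infer_instance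

-- ===== CLAIM (what is proved, stated in full; the proofs are below) =====
def Claim_equal_generate_ends : Prop := ∀ (start : Int), Dom_generate_ends start → Spec_generate_ends start (generate_ends start)

-- ===== LEMMAS AND PROOFS =====

-- both ports only see start through (start + s) % 10, so start may be replaced by start % 10
theorem pv_mod_shift (start s : Int) :
    PySem.Int.mod (start + s) 10 = PySem.Int.mod (start % 10 + s) 10 := by
  rw [PySem.Int.mod_eq_emod_of_pos (by norm_num), PySem.Int.mod_eq_emod_of_pos (by norm_num)]
  omega

theorem pv_mod_shift3 (start a b c : Int) :
    PySem.Int.mod (start + a + b + c) 10 = PySem.Int.mod (start % 10 + a + b + c) 10 := by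
  have := pv_mod_shift start (a + b + c)
  rw [show start + a + b + c = start + (a + b + c) by ring,
      show start % 10 + a + b + c = start % 10 + (a + b + c) by ring]
  exact this

theorem gA_reduce (start : Int) : generate_ends start = generate_ends (start % 10) := by
  have h10 : start % 10 % 10 = start % 10 := Int.emod_emod_of_dvd start dvd_rfl
  simp only [generate_ends, pv_mod_shift3, h10]

theorem gB_reduce (start : Int) : generate_ends_alt start = generate_ends_alt (start % 10) := by
  have h10 : start % 10 % 10 = start % 10 := Int.emod_emod_of_dvd start dvd_rfl
  simp only [generate_ends_alt, pv_mod_shift, h10]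

-- ===== VERDICT (by name: the statement is the Claim_ definition above) =====
theorem generate_ends_spec : Claim_equal_generate_ends := by
  intro start _
  show generate_ends start = generate_ends_alt start
  rw [gA_reduce, gB_reduce]
  have h1 : 0 ≤ start % 10 := Int.emod_nonneg start (by norm_num)
  have h2 : start % 10 < 10 := Int.emod_lt_of_pos start (by norm_num)
  interval_cases (start % 10) <;> decide
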